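-- pv_equiv track=rewrite | github.com/SSKYAJI/ACG | acg/repo_graph.py | _type_links
-- ===== SOURCE A (Python) =====
-- from collections.abc import Iterable
-- from typing import Any
--
-- def _unique_sorted(values: Iterable[str]) -> list[str]:
--     return sorted({value for value in values if value})
--
-- def _type_links(files: list[dict[str, Any]]) -> dict[str, list[str]]:
--     paths = {entry["path"] for entry in files}
--     out = {entry["path"]: [] for entry in files}
--     for path in sorted(paths):
--         if not path.startswith("types/") or not path.endswith(".d.ts"):
--             continue
--         stem = path[len("types/") : -len(".d.ts")]
--         for candidate in (
--             f"lib/{stem}.js",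
--             f"lib/{stem}.ts",
--             f"src/{stem}.js",
--             f"src/{stem}.ts",
--             f"{stem}.js",
--             f"{stem}.ts",
--         ):
--             if candidate not in paths:
--                 continue
--             out[path].append(candidate)
--             out[candidate].append(path)
--     return {path: _unique_sorted(links) for path, links in out.items()}
-- ===== SOURCE B (Python) =====
-- def _type_links(files):
--     paths = {entry["path"] for entry in files}
--     pairs = (("lib/", ".js"), ("lib/", ".ts"), ("src/", ".js"), ("src/", ".ts"), ("", ".js"), ("", ".ts"))
--
--     def links(path):
--         acc = []
--         if path.startswith("types/") and path.endswith(".d.ts"):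
--             stem = path[len("types/") : -len(".d.ts")]
--             for pre, suf in pairs:
--                 candidate = f"{pre}{stem}{suf}"
--                 if candidate in paths:
--                     acc.append(candidate)
--         for pre, suf in pairs:
--             if path.startswith(pre) and path.endswith(suf) and len(path) >= len(pre) + len(suf):
--                 type_path = f"types/{path[len(pre):len(path) - len(suf)]}.d.ts"
--                 if type_path in paths:
--                     acc.append(type_path)
--         return sorted(set(acc))
--
--     return {entry["path"]: links(entry["path"]) for entry in files}
-- ===== Notes on version B (the rewrite author's own statement) =====
-- stated objective: alternative
-- what changed: B drops A's mutable adjacency dictionary and sorted-loop over type paths entirely: it computes each path's link list directly from that path alone, by enumerating its own candidate stems and its (prefix, suffix) decompositions and rebuilding the matching type path for each.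
import Mathlib
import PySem

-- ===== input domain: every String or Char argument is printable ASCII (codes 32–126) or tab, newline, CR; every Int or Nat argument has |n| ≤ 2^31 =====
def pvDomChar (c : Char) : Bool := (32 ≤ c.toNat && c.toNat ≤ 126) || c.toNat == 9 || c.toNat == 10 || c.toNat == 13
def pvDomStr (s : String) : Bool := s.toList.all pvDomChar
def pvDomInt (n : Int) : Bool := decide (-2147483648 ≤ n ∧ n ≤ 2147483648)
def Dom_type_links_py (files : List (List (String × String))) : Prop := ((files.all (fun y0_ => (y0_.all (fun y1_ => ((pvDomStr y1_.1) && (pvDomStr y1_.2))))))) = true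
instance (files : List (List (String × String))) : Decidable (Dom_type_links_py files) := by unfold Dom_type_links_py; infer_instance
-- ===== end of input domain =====

-- B replaces A's mutate-two-adjacency-entries loop over the sorted type paths by a direct
-- per-path computation: each path's links are read off from its own prefix/suffix
-- decompositions, with no intermediate adjacency dictionary (objective: alternative).

-- ===== PORT A =====
-- entry["path"]  (first-match lookup; Pre_ guarantees the key is present)
def pvPath (e : List (String × String)) : String := ((PySem.Dict.mk e).get? "path").getD ""
-- Python f-string concatenation (exact for all strings)
def pvCat (a b : String) : String := String.ofList (a.toList ++ b.toList)
def pvIsType (p : String) : Bool := PySem.Str.startswith p "types/" && PySem.Str.endswith p ".d.ts"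
-- path[len("types/") : -len(".d.ts")]
def pvStem (p : String) : String := PySem.Str.slice p (some 6) (some (-5))
def pvCands (s : String) : List String :=
  [pvCat "lib/" (pvCat s ".js"), pvCat "lib/" (pvCat s ".ts"),
   pvCat "src/" (pvCat s ".js"), pvCat "src/" (pvCat s ".ts"),
   pvCat s ".js", pvCat s ".ts"]
-- _unique_sorted: sorted({v for v in values if v})
def pvUniqueSorted (l : List String) : List String :=
  PySem.List.sorted (PySem.Set.ofList (l.filter (fun v => v != ""))) (fun x => x)
-- body of the inner 'for candidate in (...)' loop
def pvInnerStep (paths : PySem.Set String) (p : String)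
    (d : PySem.Dict String (List String)) (c : String) : PySem.Dict String (List String) :=
  if PySem.Set.contains paths c then
    (d.modify p [] (fun l => l ++ [c])).modify c [] (fun l => l ++ [p])
  else d
-- body of the outer 'for path in sorted(paths)' loop ('continue' = the else branch)
def pvOuterStep (paths : PySem.Set String)
    (d : PySem.Dict String (List String)) (p : String) : PySem.Dict String (List String) :=
  if pvIsType p then (pvCands (pvStem p)).foldl (pvInnerStep paths p) d else d

def type_links_py (files : List (List (String × String))) : List (String × List String) :=
  let paths : PySem.Set String := PySem.Set.ofList (files.map pvPath)
  let out0 : PySem.Dict String (List String) :=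
    files.foldl (fun d e => d.insert (pvPath e) []) PySem.Dict.empty
  let out1 := (PySem.List.sorted paths (fun x => x)).foldl (pvOuterStep paths) out0
  out1.items.map (fun pr => (pr.1, pvUniqueSorted pr.2))

-- ===== PORT B =====
def pvPairs : List (String × String) :=
  [("lib/", ".js"), ("lib/", ".ts"), ("src/", ".js"), ("src/", ".ts"), ("", ".js"), ("", ".ts")]
-- f"{pre}{stem}{suf}"
def pvCandOf (stem : String) (pr : String × String) : String := pvCat pr.1 (pvCat stem pr.2)
-- path.startswith(pre) and path.endswith(suf) and len(path) >= len(pre) + len(suf)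
def pvCondB (p : String) (pr : String × String) : Bool :=
  PySem.Str.startswith p pr.1 && PySem.Str.endswith p pr.2 &&
    decide (PySem.Str.len pr.1 + PySem.Str.len pr.2 ≤ PySem.Str.len p)
-- f"types/{path[len(pre):len(path) - len(suf)]}.d.ts"
def pvTp (p : String) (pr : String × String) : String :=
  pvCat "types/"
    (pvCat (PySem.Str.slice p (some (PySem.Str.len pr.1)) (some (PySem.Str.len p - PySem.Str.len pr.2))) ".d.ts")

-- links(path) of Source B: candidates of this path's own stem, plus the rebuilt type path of
-- each (prefix, suffix) decomposition of this path; then sorted(set(acc))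
def pvLinks (paths : PySem.Set String) (p : String) : List String :=
  let acc1 : List String :=
    if pvIsType p then
      pvPairs.foldl (fun acc pr =>
        if PySem.Set.contains paths (pvCandOf (pvStem p) pr) then acc ++ [pvCandOf (pvStem p) pr]
        else acc) []
    else []
  let acc2 : List String :=
    pvPairs.foldl (fun acc pr =>
      if pvCondB p pr then
        (if PySem.Set.contains paths (pvTp p pr) then acc ++ [pvTp p pr] else acc)
      else acc) acc1
  PySem.List.sorted (PySem.Set.ofList acc2) (fun x => x)

def type_links_py_alt (files : List (List (String × String))) : List (String × List String) :=
  let paths : PySem.Set String := PySem.Set.ofList (files.map pvPath)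
  (files.foldl (fun d e => d.insert (pvPath e) (pvLinks paths (pvPath e))) PySem.Dict.empty).items

-- ===== PRECONDITION & SPEC =====
-- Pre_ excludes exactly the inputs where A raises KeyError: an entry without a "path" key.
def Pre_type_links_py (files : List (List (String × String))) : Prop :=
  ∀ e ∈ files, ((PySem.Dict.mk e).get? "path").isSome = true
instance (files : List (List (String × String))) : Decidable (Pre_type_links_py files) := by
  unfold Pre_type_links_py; infer_instance

def pvWitness_type_links_py : (List (List (String × String))) :=
  [[("path", "types/a.d.ts")], [("path", "lib/a.js")], [("path", "a.ts")]]

def Spec_type_links_py (files : List (List (String × String))) (out : List (String × List String)) : Prop := out = type_links_py_alt files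
instance (files : List (List (String × String))) (out : List (String × List String)) : Decidable (Spec_type_links_py files out) := by unfold Spec_type_links_py; infer_instance

-- ===== CLAIM (what is proved, stated in full; the proofs are below) =====
def Claim_equal_type_links_py : Prop := ∀ (files : List (List (String × String))), Dom_type_links_py files → Pre_type_links_py files → Spec_type_links_py files (type_links_py files)

-- ===== LEMMAS AND PROOFS =====

theorem pvWitness_ok :
    Dom_type_links_py pvWitness_type_links_py ∧ Pre_type_links_py pvWitness_type_links_py := by
  decide

-- generic three-way decomposition from a prefix, a suffix and enough length
theorem pv_decomp {P S l : List Char} (hp : P <+: l) (hs : S <:+ l)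
    (hlen : P.length + S.length ≤ l.length) : ∃ m, l = P ++ m ++ S := by
  obtain ⟨r, rfl⟩ := hp
  obtain ⟨t, ht⟩ := hs
  have hPt : P <+: t := by
    apply List.prefix_of_prefix_length_le (l₃ := t ++ S)
    · rw [ht]; exact List.prefix_append P r
    · exact List.prefix_append t S
    · have := congrArg List.length ht
      simp [List.length_append] at this hlen ⊢
      omega
  obtain ⟨u, rfl⟩ := hPt
  refine ⟨u, ?_⟩
  have h1 : P ++ (u ++ S) = P ++ r := by simpa [List.append_assoc] using ht
  have h2 := List.append_cancel_left h1
  rw [← h2]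
  simp [List.append_assoc]

theorem pvT_lit : "types/".toList = ['t','y','p','e','s','/'] := by decide
theorem pvD_lit : ".d.ts".toList = ['.','d','.','t','s'] := by decide

-- "types/" and ".d.ts" cannot overlap: a path is a type path iff it has the exact shape
theorem pvIsType_iff (p : String) :
    pvIsType p = true ↔ ∃ m, p.toList = "types/".toList ++ m ++ ".d.ts".toList := by
  constructor
  · intro h
    simp only [pvIsType, Bool.and_eq_true, PySem.Str.startswith_eq, PySem.Str.endswith_eq] at h
    obtain ⟨h1, h2⟩ := h
    rw [PySem.Chars.startswith_iff] at h1
    rw [PySem.Chars.endswith_iff] at h2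
    refine pv_decomp h1 h2 ?_
    by_contra hlen
    push_neg at hlen
    obtain ⟨r, hr⟩ := h1
    obtain ⟨t, ht⟩ := h2
    have hlr : 6 + r.length = p.toList.length := by
      rw [← hr]; simp [pvT_lit]; omega
    have hlt : t.length + 5 = p.toList.length := by
      rw [← ht]; simp [pvD_lit]
    have hlen' : p.toList.length < 11 := by
      simpa [pvT_lit, pvD_lit] using hlen
    have htP : t <+: "types/".toList := by
      apply List.prefix_of_prefix_length_le (l₃ := p.toList) ⟨".d.ts".toList, ht⟩ ⟨r, hr⟩
      simp [pvT_lit]; omega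
    obtain ⟨u, hu⟩ := htP
    have huD : u <+: ".d.ts".toList := by
      have h3 : t ++ ".d.ts".toList = t ++ (u ++ r) := by
        rw [ht, ← hr, ← hu, List.append_assoc]
      exact ⟨r, (List.append_cancel_left h3).symm⟩
    have hul : t.length + u.length = 6 := by
      have := congrArg List.length hu; simpa [pvT_lit] using this
    have hune : u ≠ [] := by
      intro h0; rw [h0] at hul; simp at hul; omega
    match u, hune, hu, huD with
    | c :: u', _, hu, huD =>
      have hc : c = '.' := by
        obtain ⟨v, hv⟩ := huD
        rw [pvD_lit, List.cons_append] at hv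
        injection hv
      have hmem : c ∈ "types/".toList := by
        rw [← hu]; exact List.mem_append_right t List.mem_cons_self
      rw [hc, pvT_lit] at hmem
      simp at hmem
  · rintro ⟨m, hm⟩
    simp only [pvIsType, Bool.and_eq_true, PySem.Str.startswith_eq, PySem.Str.endswith_eq]
    constructor
    · rw [PySem.Chars.startswith_iff, hm]
      exact ⟨m ++ ".d.ts".toList, by simp⟩
    · rw [PySem.Chars.endswith_iff, hm]
      exact ⟨"types/".toList ++ m, by simp⟩

-- the middle part of P ++ m ++ S by nonnegative-index slicing
theorem pv_slice_mid (l : List Char) {P m S : List Char} (hm : l = P ++ m ++ S) :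
    PySem.List.slice l (some (P.length : Int)) (some ((l.length : Int) - (S.length : Int))) = m := by
  subst hm
  have hb : ((P ++ m ++ S).length : Int) - (S.length : Int) = ((P.length + m.length : Nat) : Int) := by
    simp [List.length_append]; push_cast; ring
  rw [hb]
  simp only [PySem.List.slice, PySem.List.clampIdx_natCast]
  have h1 : min P.length (P ++ m ++ S).length = P.length := by
    simp [List.length_append] <;> omega
  have h2 : min (P.length + m.length) (P ++ m ++ S).length = P.length + m.length := by
    simp [List.length_append] <;> omega
  rw [h1, h2, List.append_assoc, List.drop_left]
  simp

-- A's stem slice path[6:-5]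
theorem pvStem_toList {p : String} {m : List Char}
    (hm : p.toList = "types/".toList ++ m ++ ".d.ts".toList) :
    (pvStem p).toList = m := by
  have hchars : PySem.Chars.slice p.toList (some 6) (some (-5)) = m := by
    rw [PySem.Chars.slice_eq_listSlice, hm]
    have hl : ("types/".toList ++ m ++ ".d.ts".toList).length = m.length + 11 := by
      simp only [List.length_append, pvT_lit, pvD_lit, List.length_cons, List.length_nil]
      omega
    simp only [PySem.List.slice, hl]
    have ha : PySem.List.clampIdx (m.length + 11) 6 = 6 := by
      unfold PySem.List.clampIdx; split_ifs <;> omega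
    have hb : PySem.List.clampIdx (m.length + 11) (-5) = m.length + 6 := by
      unfold PySem.List.clampIdx; split_ifs <;> omega
    rw [ha, hb, pvT_lit, pvD_lit]
    simp
  simp only [pvStem, PySem.Str.toList_slice, hchars]

-- membership in pvCands, via the (prefix, suffix) pair list
theorem pv_mem_cands (s k : String) :
    k ∈ pvCands s ↔ ∃ pr ∈ pvPairs, k.toList = pr.1.toList ++ s.toList ++ pr.2.toList := by
  have hk : ∀ a b c : String, (k = pvCat a (pvCat b c)) ↔ k.toList = a.toList ++ b.toList ++ c.toList := by
    intro a b c
    constructor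
    · intro h; rw [h]; simp [pvCat, String.toList_ofList, List.append_assoc]
    · intro h
      apply String.toList_inj.mp
      simp [pvCat, String.toList_ofList, List.append_assoc, h]
  constructor
  · intro h
    simp only [pvCands, List.mem_cons, List.not_mem_nil, or_false] at h
    rcases h with h | h | h | h | h | h
    · exact ⟨("lib/", ".js"), by simp [pvPairs], (hk _ _ _).mp h⟩
    · exact ⟨("lib/", ".ts"), by simp [pvPairs], (hk _ _ _).mp h⟩
    · exact ⟨("src/", ".js"), by simp [pvPairs], (hk _ _ _).mp h⟩
    · exact ⟨("src/", ".ts"), by simp [pvPairs], (hk _ _ _).mp h⟩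
    · rw [show pvCat s ".js" = pvCat "" (pvCat s ".js") from by simp [pvCat, String.toList_ofList]] at h
      exact ⟨("", ".js"), by simp [pvPairs], (hk _ _ _).mp h⟩
    · rw [show pvCat s ".ts" = pvCat "" (pvCat s ".ts") from by simp [pvCat, String.toList_ofList]] at h
      exact ⟨("", ".ts"), by simp [pvPairs], (hk _ _ _).mp h⟩
  · rintro ⟨pr, hpr, hdec⟩
    simp only [pvPairs, List.mem_cons, List.not_mem_nil, or_false] at hpr
    rcases hpr with rfl | rfl | rfl | rfl | rfl | rfl
    · simp [pvCands]; left; exact (hk _ _ _).mpr hdec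
    · simp [pvCands]; right; left; exact (hk _ _ _).mpr hdec
    · simp [pvCands]; right; right; left; exact (hk _ _ _).mpr hdec
    · simp [pvCands]; right; right; right; left; exact (hk _ _ _).mpr hdec
    · have h5 : k = pvCat "" (pvCat s ".js") := (hk _ _ _).mpr hdec
      simp [pvCands]; right; right; right; right; left
      rw [h5]; apply String.toList_inj.mp; simp [pvCat, String.toList_ofList]
    · have h6 : k = pvCat "" (pvCat s ".ts") := (hk _ _ _).mpr hdec
      simp [pvCands]; right; right; right; right; right
      rw [h6]; apply String.toList_inj.mp; simp [pvCat, String.toList_ofList]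

-- pvCands s lists exactly the pair-built candidates
theorem pvCat_nil (b : String) : pvCat "" b = b := by
  apply String.toList_inj.mp
  simp [pvCat, String.toList_ofList]

theorem pvCands_eq_map (s : String) :
    pvCands s = pvPairs.map (pvCandOf s) := by
  simp [pvCands, pvPairs, pvCandOf, pvCat_nil]

-- value stored for k by B's dict-building fold
theorem pv_getD_insert_fold (l : List (List (String × String))) (g : String → List String)
    (d : PySem.Dict String (List String)) (k : String) :
    (l.foldl (fun d e => d.insert (pvPath e) (g (pvPath e))) d).getD k [] =
      if k ∈ l.map pvPath then g k else d.getD k [] := by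
  induction l generalizing d with
  | nil => simp
  | cons e rest ih =>
    simp only [List.foldl_cons, List.map_cons, List.mem_cons]
    rw [ih]
    by_cases h1 : k ∈ rest.map pvPath
    · simp [h1]
    · by_cases h2 : k = pvPath e
      · simp [h1, h2, PySem.Dict.getD_insert]
      · simp [h1, h2, PySem.Dict.getD_insert]

-- A's initial dict stores [] everywhere
theorem pv_getD_out0 (l : List (List (String × String)))
    (d : PySem.Dict String (List String)) (k : String) (hd : d.getD k [] = []) :
    (l.foldl (fun d e => d.insert (pvPath e) ([] : List String)) d).getD k [] = [] := by
  induction l generalizing d with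
  | nil => exact hd
  | cons e rest ih =>
    refine ih _ ?_
    rw [PySem.Dict.getD_insert]
    split <;> simp [hd]

-- contribution of one candidate c of type path t to the adjacency list of k
def pvPairContrib (paths : PySem.Set String) (t k c : String) : List String :=
  if PySem.Set.contains paths c then
    (if t = k then [c] else []) ++ (if c = k then [t] else [])
  else []

theorem pv_inner_getD (paths : PySem.Set String) (t : String) (cl : List String)
    (d : PySem.Dict String (List String)) (k : String) :
    (cl.foldl (pvInnerStep paths t) d).getD k [] =
      d.getD k [] ++ cl.flatMap (pvPairContrib paths t k) := by
  induction cl generalizing d with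
  | nil => simp
  | cons c rest ih =>
    simp only [List.foldl_cons, List.flatMap_cons, ih]
    have hstep : (pvInnerStep paths t d c).getD k [] =
        d.getD k [] ++ pvPairContrib paths t k c := by
      unfold pvInnerStep pvPairContrib
      by_cases hc : PySem.Set.contains paths c = true
      · rw [if_pos hc, if_pos hc, PySem.Dict.getD_modify, PySem.Dict.getD_modify]
        rcases eq_or_ne k c with rfl | h1 <;> rcases eq_or_ne k t with rfl | h2 <;>
          simp_all [List.append_assoc, eq_comm, PySem.Dict.getD_modify]
      · rw [if_neg hc, if_neg hc]
        simp
    rw [hstep, List.append_assoc]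

-- contribution of one path t (processed by the outer loop) to the adjacency list of k
def pvTypeContrib (paths : PySem.Set String) (k t : String) : List String :=
  if pvIsType t then (pvCands (pvStem t)).flatMap (pvPairContrib paths t k) else []

theorem pv_outer_getD (paths : PySem.Set String) (L : List String)
    (d : PySem.Dict String (List String)) (k : String) :
    (L.foldl (pvOuterStep paths) d).getD k [] =
      d.getD k [] ++ L.flatMap (pvTypeContrib paths k) := by
  induction L generalizing d with
  | nil => simp
  | cons t rest ih =>
    simp only [List.foldl_cons, List.flatMap_cons, ih, pvOuterStep, pvTypeContrib]
    by_cases ht : pvIsType t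
    · simp only [ht, if_true]
      rw [pv_inner_getD, List.append_assoc]
    · simp [ht]

-- the loops never create keys: every touched key is already present
theorem pv_inner_keys (paths : PySem.Set String) (t : String) (cl : List String)
    (d : PySem.Dict String (List String))
    (hd : ∀ y ∈ paths, d.contains y = true) (htp : t ∈ paths) :
    (cl.foldl (pvInnerStep paths t) d).keys = d.keys ∧
      (∀ y ∈ paths, (cl.foldl (pvInnerStep paths t) d).contains y = true) := by
  induction cl generalizing d with
  | nil => exact ⟨rfl, hd⟩
  | cons c rest ih =>
    have hstep : (pvInnerStep paths t d c).keys = d.keys ∧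
        (∀ y ∈ paths, (pvInnerStep paths t d c).contains y = true) := by
      unfold pvInnerStep
      by_cases hc : PySem.Set.contains paths c = true
      · have hcmem : c ∈ paths := (PySem.Set.contains_iff paths c).mp hc
        simp only [hc, if_true]
        constructor
        · rw [PySem.Dict.keys_modify, PySem.Dict.keys_insert_of_contains]
          · rw [PySem.Dict.keys_modify, PySem.Dict.keys_insert_of_contains]
            exact hd t htp
          · rw [PySem.Dict.contains_modify]
            simp [hd c hcmem]
        · intro y hy
          rw [PySem.Dict.contains_modify, PySem.Dict.contains_modify]
          simp [hd y hy]
      · rw [if_neg hc]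
        exact ⟨rfl, hd⟩
    obtain ⟨h1, h2⟩ := ih (pvInnerStep paths t d c) hstep.2
    exact ⟨by simp only [List.foldl_cons, h1, hstep.1], by simpa using h2⟩

theorem pv_outer_keys (paths : PySem.Set String) (L : List String)
    (d : PySem.Dict String (List String))
    (hd : ∀ y ∈ paths, d.contains y = true) (hL : ∀ t ∈ L, t ∈ paths) :
    (L.foldl (pvOuterStep paths) d).keys = d.keys := by
  induction L generalizing d with
  | nil => rfl
  | cons t rest ih =>
    have hstep : (pvOuterStep paths d t).keys = d.keys ∧
        (∀ y ∈ paths, (pvOuterStep paths d t).contains y = true) := by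
      unfold pvOuterStep
      by_cases ht : pvIsType t
      · rw [if_pos ht]
        exact pv_inner_keys paths t (pvCands (pvStem t)) d hd (hL t List.mem_cons_self)
      · rw [if_neg ht]
        exact ⟨rfl, hd⟩
    rw [List.foldl_cons, ih _ hstep.2 (fun x hx => hL x (List.mem_cons_of_mem t hx)), hstep.1]

-- membership through B's nested-if append loop
theorem pv_mem_nested_fold {β : Type} (l : List β) (C1 C2 : β → Bool)
    (g : β → String) (acc : List String) (x : String) :
    (x ∈ l.foldl (fun a pr => if C1 pr then (if C2 pr then a ++ [g pr] else a) else a) acc) ↔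
      x ∈ acc ∨ ∃ pr ∈ l, C1 pr = true ∧ C2 pr = true ∧ x = g pr := by
  induction l generalizing acc with
  | nil => simp
  | cons pr rest ih =>
    simp only [List.foldl_cons, ih, List.mem_cons]
    by_cases h1 : C1 pr = true
    · by_cases h2 : C2 pr = true
      · simp only [h1, h2, if_true, List.mem_append, List.mem_singleton]
        constructor
        · rintro (⟨hx | hx⟩ | ⟨q, hq, hc⟩)
          · exact Or.inl hx
          · exact Or.inr ⟨pr, Or.inl rfl, h1, h2, hx⟩
          · exact Or.inr ⟨q, Or.inr hq, hc⟩
        · rintro (hx | ⟨q, (rfl | hq), hc1, hc2, hc3⟩)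
          · exact Or.inl (Or.inl hx)
          · exact Or.inl (Or.inr hc3)
          · exact Or.inr ⟨q, hq, hc1, hc2, hc3⟩
      · simp only [h1, h2, if_true, if_false]
        constructor
        · rintro (hx | ⟨q, hq, hc⟩)
          · exact Or.inl hx
          · exact Or.inr ⟨q, Or.inr hq, hc⟩
        · rintro (hx | ⟨q, (rfl | hq), hc1, hc2, hc3⟩)
          · exact Or.inl hx
          · exact absurd hc2 h2
          · exact Or.inr ⟨q, hq, hc1, hc2, hc3⟩
    · simp only [h1, if_false]
      constructor
      · rintro (hx | ⟨q, hq, hc⟩)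
        · exact Or.inl hx
        · exact Or.inr ⟨q, Or.inr hq, hc⟩
      · rintro (hx | ⟨q, (rfl | hq), hc1, hc2, hc3⟩)
        · exact Or.inl hx
        · exact absurd hc1 h1
        · exact Or.inr ⟨q, hq, hc1, hc2, hc3⟩

-- B's pair condition holds exactly on the (prefix, middle, suffix) decompositions of p
theorem pvCondB_iff (p : String) (pr : String × String) :
    pvCondB p pr = true ↔ ∃ m, p.toList = pr.1.toList ++ m ++ pr.2.toList := by
  unfold pvCondB
  simp only [Bool.and_eq_true, decide_eq_true_eq, PySem.Str.startswith_eq,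
    PySem.Str.endswith_eq, PySem.Str.len_eq]
  constructor
  · rintro ⟨⟨h1, h2⟩, h3⟩
    rw [PySem.Chars.startswith_iff] at h1
    rw [PySem.Chars.endswith_iff] at h2
    exact pv_decomp h1 h2 (by exact_mod_cast h3)
  · rintro ⟨m, hm⟩
    refine ⟨⟨?_, ?_⟩, ?_⟩
    · rw [PySem.Chars.startswith_iff, hm]; exact ⟨m ++ pr.2.toList, by simp⟩
    · rw [PySem.Chars.endswith_iff, hm]; exact ⟨pr.1.toList ++ m, by simp⟩
    · have hlen := congrArg List.length hm
      rw [List.length_append, List.length_append] at hlen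
      push_cast
      omega

-- the type path B rebuilds from a decomposition has the canonical shape around its middle
theorem pvTp_toList {p : String} {pr : String × String} {m : List Char}
    (hm : p.toList = pr.1.toList ++ m ++ pr.2.toList) :
    (pvTp p pr).toList = "types/".toList ++ m ++ ".d.ts".toList := by
  have hmid : (PySem.Str.slice p (some (PySem.Str.len pr.1))
      (some (PySem.Str.len p - PySem.Str.len pr.2))).toList = m := by
    rw [PySem.Str.toList_slice, PySem.Chars.slice_eq_listSlice]
    simp only [PySem.Str.len_eq, String.length_toList]
    rw [show ((pr.1.length : Nat) : Int) = ((pr.1.toList.length : Nat) : Int) from by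
          rw [String.length_toList],
        show ((p.length : Nat) : Int) - ((pr.2.length : Nat) : Int)
            = ((p.toList.length : Nat) : Int) - ((pr.2.toList.length : Nat) : Int) from by
          rw [String.length_toList, String.length_toList]]
    exact pv_slice_mid p.toList hm
  simp only [pvTp, pvCat, String.toList_ofList]
  rw [hmid]
  simp [List.append_assoc]

-- the two membership characterizations agree (k a path of the repository)
theorem pv_links_mem_iff (paths : PySem.Set String) (k x : String) (hk : k ∈ paths) :
    (∃ t ∈ paths, x ∈ pvTypeContrib paths k t) ↔
      (pvIsType k = true ∧ ∃ pr ∈ pvPairs,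
          PySem.Set.contains paths (pvCandOf (pvStem k) pr) = true ∧ x = pvCandOf (pvStem k) pr) ∨
        (∃ pr ∈ pvPairs, pvCondB k pr = true ∧ PySem.Set.contains paths (pvTp k pr) = true
          ∧ x = pvTp k pr) := by
  constructor
  · rintro ⟨t, htp, hx⟩
    unfold pvTypeContrib at hx
    by_cases ht : pvIsType t = true
    · rw [if_pos ht] at hx
      simp only [List.mem_flatMap] at hx
      obtain ⟨c, hc, hxc⟩ := hx
      unfold pvPairContrib at hxc
      by_cases hcc : PySem.Set.contains paths c = true
      · rw [if_pos hcc] at hxc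
        simp only [List.mem_append] at hxc
        rcases hxc with hxc | hxc
        · split at hxc
          · next htk =>
            simp only [List.mem_singleton] at hxc
            subst hxc; subst htk
            left
            refine ⟨ht, ?_⟩
            rw [pvCands_eq_map, List.mem_map] at hc
            obtain ⟨pr, hpr, rfl⟩ := hc
            exact ⟨pr, hpr, hcc, rfl⟩
          · simp at hxc
        · split at hxc
          · next hck =>
            simp only [List.mem_singleton] at hxc
            subst hxc
            right
            obtain ⟨m, hmt⟩ := (pvIsType_iff x).mp ht
            have hstem := pvStem_toList hmt
            rw [pv_mem_cands] at hc
            obtain ⟨pr, hpr, hdec⟩ := hc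
            rw [hstem] at hdec
            rw [← hck]
            refine ⟨pr, hpr, (pvCondB_iff c pr).mpr ⟨m, hdec⟩, ?_⟩
            have htpx : pvTp c pr = x := by
              apply String.toList_inj.mp
              rw [pvTp_toList hdec, hmt]
            rw [htpx]
            exact ⟨(PySem.Set.contains_iff paths x).mpr htp, rfl⟩
          · simp at hxc
      · rw [if_neg hcc] at hxc; simp at hxc
    · rw [if_neg ht] at hx; simp at hx
  · rintro (⟨hik, pr, hpr, hcc, rfl⟩ | ⟨pr, hpr, hcond, hcc, rfl⟩)
    · refine ⟨k, hk, ?_⟩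
      unfold pvTypeContrib
      rw [if_pos hik]
      simp only [List.mem_flatMap]
      refine ⟨pvCandOf (pvStem k) pr, ?_, ?_⟩
      · rw [pvCands_eq_map, List.mem_map]; exact ⟨pr, hpr, rfl⟩
      · unfold pvPairContrib
        rw [if_pos hcc]
        simp
    · obtain ⟨m, hm⟩ := (pvCondB_iff k pr).mp hcond
      have htp := pvTp_toList (pr := pr) hm
      refine ⟨pvTp k pr, (PySem.Set.contains_iff paths _).mp hcc, ?_⟩
      unfold pvTypeContrib
      have hit : pvIsType (pvTp k pr) = true := (pvIsType_iff _).mpr ⟨m, htp⟩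
      rw [if_pos hit]
      simp only [List.mem_flatMap]
      refine ⟨k, ?_, ?_⟩
      · rw [pv_mem_cands]
        exact ⟨pr, hpr, by rw [pvStem_toList htp]; exact hm⟩
      · unfold pvPairContrib
        rw [if_pos ((PySem.Set.contains_iff paths k).mpr hk)]
        simp

theorem pv_pairs_snd_ne_nil {pr : String × String} (hpr : pr ∈ pvPairs) : pr.2.toList ≠ [] := by
  simp only [pvPairs, List.mem_cons, List.not_mem_nil, or_false] at hpr
  rcases hpr with rfl | rfl | rfl | rfl | rfl | rfl <;> decide

-- every link is a nonempty string, so _unique_sorted's truthiness filter drops nothing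
theorem pv_ne_empty_of_mem (paths : PySem.Set String) (k x : String)
    (h : (pvIsType k = true ∧ ∃ pr ∈ pvPairs,
            PySem.Set.contains paths (pvCandOf (pvStem k) pr) = true ∧ x = pvCandOf (pvStem k) pr) ∨
          (∃ pr ∈ pvPairs, pvCondB k pr = true ∧ PySem.Set.contains paths (pvTp k pr) = true
            ∧ x = pvTp k pr)) : x ≠ "" := by
  have hnil : ("" : String).toList = [] := by decide
  rcases h with ⟨_, pr, hpr, _, rfl⟩ | ⟨pr, hpr, hcond, _, rfl⟩
  · intro h0
    have := congrArg String.toList h0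
    simp only [pvCandOf, pvCat, String.toList_ofList, hnil, List.append_eq_nil_iff] at this
    exact pv_pairs_snd_ne_nil hpr this.2.2
  · intro h0
    obtain ⟨m, hm⟩ := (pvCondB_iff k pr).mp hcond
    have := congrArg String.toList h0
    rw [pvTp_toList hm, hnil] at this
    simp at this

theorem pv_sortedSet_congr (l1 l2 : List String) (h : ∀ x, x ∈ l1 ↔ x ∈ l2) :
    PySem.List.sorted (PySem.Set.ofList l1) (fun x => x) =
      PySem.List.sorted (PySem.Set.ofList l2) (fun x => x) := by
  apply PySem.List.sorted_eq_sorted_of_perm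
  · exact fun a b hab => hab
  · rw [List.perm_ext_iff_of_nodup (PySem.Set.nodup_ofList l1) (PySem.Set.nodup_ofList l2)]
    intro a
    rw [PySem.Set.mem_ofList, PySem.Set.mem_ofList]
    exact h a

-- per-key: A's accumulated-and-cleaned list equals B's directly computed one
theorem pv_key_links (paths : PySem.Set String) (k : String) (hk : k ∈ paths) :
    pvUniqueSorted ((PySem.List.sorted paths (fun x => x)).flatMap (pvTypeContrib paths k)) =
      pvLinks paths k := by
  unfold pvUniqueSorted pvLinks
  apply pv_sortedSet_congr
  intro x
  rw [List.mem_filter]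
  rw [pv_mem_nested_fold pvPairs (pvCondB k) (fun pr => PySem.Set.contains paths (pvTp k pr)) (pvTp k)]
  have hacc1 : (x ∈ if pvIsType k then
      pvPairs.foldl (fun acc pr =>
        if PySem.Set.contains paths (pvCandOf (pvStem k) pr) then acc ++ [pvCandOf (pvStem k) pr]
        else acc) [] else []) ↔
      (pvIsType k = true ∧ ∃ pr ∈ pvPairs,
        PySem.Set.contains paths (pvCandOf (pvStem k) pr) = true ∧ x = pvCandOf (pvStem k) pr) := by
    by_cases hik : pvIsType k = true
    · rw [if_pos hik,
        PySem.List.foldl_append_if (fun pr => PySem.Set.contains paths (pvCandOf (pvStem k) pr))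
          (pvCandOf (pvStem k)) pvPairs []]
      simp only [List.nil_append, List.mem_map, List.mem_filter, hik, true_and]
      constructor
      · rintro ⟨pr, hpr, rfl⟩
        exact ⟨pr, hpr.1, hpr.2, rfl⟩
      · rintro ⟨pr, hpr, hcc, rfl⟩
        exact ⟨pr, ⟨hpr, hcc⟩, rfl⟩
    · simp [hik]
  rw [hacc1]
  have hflat : x ∈ (PySem.List.sorted paths (fun x => x)).flatMap (pvTypeContrib paths k) ↔
      ∃ t ∈ paths, x ∈ pvTypeContrib paths k t := by
    simp [List.mem_flatMap, PySem.List.mem_sorted]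
  constructor
  · rintro ⟨hmem, _⟩
    exact (pv_links_mem_iff paths k x hk).mp (hflat.mp hmem)
  · intro hmem
    refine ⟨hflat.mpr ((pv_links_mem_iff paths k x hk).mpr hmem), ?_⟩
    rw [bne_iff_ne]
    exact pv_ne_empty_of_mem paths k x hmem

-- ===== VERDICT (by name: the statement is the Claim_ definition above) =====
theorem type_links_py_spec : Claim_equal_type_links_py := by
  intro files _ _
  unfold Spec_type_links_py type_links_py type_links_py_alt
  simp only []
  have hkeys0 : (files.foldl (fun d e => d.insert (pvPath e) ([] : List String))
      PySem.Dict.empty).keys = PySem.Set.ofList (files.map pvPath) := by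
    rw [PySem.Dict.keys_foldl_insert_key files pvPath (fun _ _ => ([] : List String))
      PySem.Dict.empty, PySem.Dict.keys_empty, PySem.Set.update_nil_left]
  have hnodup0 : (files.foldl (fun d e => d.insert (pvPath e) ([] : List String))
      PySem.Dict.empty).keys.Nodup :=
    PySem.Dict.nodup_keys_foldl_insert_key files pvPath _ _ PySem.Dict.nodup_keys_empty
  have hcont0 : ∀ y ∈ PySem.Set.ofList (files.map pvPath),
      (files.foldl (fun d e => d.insert (pvPath e) ([] : List String))
        PySem.Dict.empty).contains y = true := by
    intro y hy
    rw [PySem.Dict.contains_iff_mem_keys, hkeys0]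
    exact hy
  have hkeys1 : ((PySem.List.sorted (PySem.Set.ofList (files.map pvPath)) (fun x => x)).foldl
      (pvOuterStep (PySem.Set.ofList (files.map pvPath)))
      (files.foldl (fun d e => d.insert (pvPath e) ([] : List String)) PySem.Dict.empty)).keys =
      PySem.Set.ofList (files.map pvPath) := by
    rw [pv_outer_keys _ _ _ hcont0
      (fun t ht => (PySem.List.mem_sorted _ _ _ t).mp ht), hkeys0]
  have hkeysB : (files.foldl (fun d e => d.insert (pvPath e)
      (pvLinks (PySem.Set.ofList (files.map pvPath)) (pvPath e))) PySem.Dict.empty).keys =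
      PySem.Set.ofList (files.map pvPath) := by
    rw [PySem.Dict.keys_foldl_insert_key files pvPath
      (fun _ e => pvLinks (PySem.Set.ofList (files.map pvPath)) (pvPath e)) PySem.Dict.empty,
      PySem.Dict.keys_empty, PySem.Set.update_nil_left]
  have hnodupB : (files.foldl (fun d e => d.insert (pvPath e)
      (pvLinks (PySem.Set.ofList (files.map pvPath)) (pvPath e))) PySem.Dict.empty).keys.Nodup :=
    PySem.Dict.nodup_keys_foldl_insert_key files pvPath _ _ PySem.Dict.nodup_keys_empty
  rw [PySem.Dict.items_eq_map_keys _ (by rw [hkeys1]; exact hkeys0 ▸ hnodup0) ([] : List String),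
    PySem.Dict.items_eq_map_keys _ hnodupB ([] : List String), hkeys1, hkeysB, List.map_map]
  apply List.map_congr_left
  intro k hk
  simp only [Function.comp_apply]
  have hvalA : ((PySem.List.sorted (PySem.Set.ofList (files.map pvPath)) (fun x => x)).foldl
      (pvOuterStep (PySem.Set.ofList (files.map pvPath)))
      (files.foldl (fun d e => d.insert (pvPath e) ([] : List String)) PySem.Dict.empty)).getD k [] =
      (PySem.List.sorted (PySem.Set.ofList (files.map pvPath)) (fun x => x)).flatMap
        (pvTypeContrib (PySem.Set.ofList (files.map pvPath)) k) := by
    rw [pv_outer_getD, pv_getD_out0 files PySem.Dict.empty k (by simp [PySem.Dict.getD_empty])]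
    simp
  have hvalB : (files.foldl (fun d e => d.insert (pvPath e)
      (pvLinks (PySem.Set.ofList (files.map pvPath)) (pvPath e))) PySem.Dict.empty).getD k [] =
      pvLinks (PySem.Set.ofList (files.map pvPath)) k := by
    rw [pv_getD_insert_fold files (pvLinks (PySem.Set.ofList (files.map pvPath)))
      PySem.Dict.empty k, if_pos ((PySem.Set.mem_ofList (files.map pvPath) k).mp hk)]
  rw [hvalA, hvalB, pv_key_links _ k hk]
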